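-- pv_equiv track=rewrite | github.com/vokvag/support-programs | resizeimage/Image_Modifier.py | Name_Checking
-- ===== SOURCE A (Python) =====
-- def Name_Checking(name):
--     a= name.split("-")
--     name = a[0]
--     if(name.isdigit()):
--         return name
--     else:
--         final = ""
--         m = 0
--         temp = ""
--         l = 0
--         for letter in name:
--             if(letter.isdigit()):
--                 temp = temp+letter
--                 l = l+1
--             else:
--                 if(l>m):
--                     m = l
--                     final = temp
--                 temp = ""
--                 l = 0
--         if(l>m):
--             final = temp
--         return final
-- ===== SOURCE B (Python) =====
-- def Name_Checking(name):
--     first = name.split("-")[0]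
--     n = len(first)
--     run = [0] * (n + 1)
--     for i in range(n - 1, -1, -1):
--         run[i] = run[i + 1] + 1 if first[i].isdigit() else 0
--     best = 0
--     start = 0
--     for i, v in enumerate(run[:n]):
--         if v > best:
--             best, start = v, i
--     return first[start:start + best]
-- ===== Notes on version B (the rewrite author's own statement) =====
-- stated objective: alternative
-- what changed: B replaces A's forward running-max scan with four loop-carried variables by a suffix dynamic program: a right-to-left pass builds a table run[i] = length of the digit run starting at i, a second pass takes the first argmax of that table, and the answer is sliced out of the first hyphen token; A's separate all-digit shortcut disappears.
import Mathlib
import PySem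

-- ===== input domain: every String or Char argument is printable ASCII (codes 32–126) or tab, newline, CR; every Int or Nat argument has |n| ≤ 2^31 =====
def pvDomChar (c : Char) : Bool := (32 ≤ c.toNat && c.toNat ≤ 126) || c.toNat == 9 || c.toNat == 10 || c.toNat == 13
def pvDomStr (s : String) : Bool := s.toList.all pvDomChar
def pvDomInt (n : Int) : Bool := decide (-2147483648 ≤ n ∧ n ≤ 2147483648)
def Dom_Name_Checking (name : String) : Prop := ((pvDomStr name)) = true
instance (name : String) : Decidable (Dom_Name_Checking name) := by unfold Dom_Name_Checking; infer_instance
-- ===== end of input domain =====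

-- B replaces A's forward running-max scan (four loop variables) by a suffix dynamic program:
-- a right-to-left pass fills run[i] = length of the digit run starting at i, a second pass takes
-- the first argmax, and the answer is sliced out of the string. Same return value ("alternative").

-- ===== PORT A =====
-- A's loop body: state (final, m, temp, l); strings handled on the List Char side (PySem.Chars)
def pvStepA (st : List Char × Nat × List Char × Nat) (letter : Char) :
    List Char × Nat × List Char × Nat :=
  if PySem.Chars.isdigit letter then (st.1, st.2.1, st.2.2.1 ++ [letter], st.2.2.2 + 1)
  else if st.2.2.2 > st.2.1 then (st.2.2.1, st.2.2.2, [], 0)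
  else (st.1, st.2.1, [], 0)

-- A's trailing 'if(l>m): final = temp' and 'return final'
def pvAnswerA (st : List Char × Nat × List Char × Nat) : List Char :=
  if st.2.2.2 > st.2.1 then st.2.2.1 else st.1

def Name_Checking (name : String) : String :=
  let a := (PySem.Str.split? name "-").getD []   -- sep "-" ≠ "", so split? is never none
  let name1 := a.headD ""                        -- a[0]; split always returns a nonempty list
  if PySem.Str.strIsdigit name1 then name1
  else String.ofList (pvAnswerA (name1.toList.foldl pvStepA ([], 0, [], 0)))

-- ===== PORT B =====
-- the backwards loop 'for i in range(n-1,-1,-1): run[i] = run[i+1]+1 if digit else 0':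
-- building the run table right-to-left, with run[n] = 0 as the sentinel
def pvRunVals : List Char → List Nat
  | [] => [0]
  | c :: cs =>
    let r := pvRunVals cs
    (if PySem.Chars.isdigit c then r.headD 0 + 1 else 0) :: r

-- the argmax loop body: 'for i, v in enumerate(run[:n]): if v > best: best, start = v, i'
def pvArgStep (st : Nat × Nat) (p : Int × Nat) : Nat × Nat :=
  if p.2 > st.1 then (p.2, p.1.toNat) else st   -- enumerate indices are the Nats 0..n-1

def Name_Checking_alt (name : String) : String :=
  let first := ((PySem.Str.split? name "-").getD []).headD ""
  let cs := first.toList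
  let r := pvRunVals cs
  let bs := (PySem.List.enumerate (r.take cs.length) 0).foldl pvArgStep (0, 0)
  String.ofList (PySem.List.slice cs (some (bs.2 : Int)) (some ((bs.2 : Int) + (bs.1 : Int))))

-- ===== PRECONDITION & SPEC =====
def Spec_Name_Checking (name : String) (out : String) : Prop := out = Name_Checking_alt name
instance (name : String) (out : String) : Decidable (Spec_Name_Checking name out) := by unfold Spec_Name_Checking; infer_instance

-- ===== CLAIM (what is proved, stated in full; the proofs are below) =====
def Claim_equal_Name_Checking : Prop := ∀ (name : String), Dom_Name_Checking name → Spec_Name_Checking name (Name_Checking name)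

-- ===== LEMMAS AND PROOFS =====

-- length of the digit prefix
def pvTW (cs : List Char) : Nat := (cs.takeWhile PySem.Chars.isdigit).length

-- A's runs, read from the left with the pending run `t` as accumulator (proof-only helper)
def pvRunsP (t : List Char) : List Char → List (List Char)
  | [] => if t = [] then [] else [t]
  | c :: cs =>
    if PySem.Chars.isdigit c then pvRunsP (t ++ [c]) cs
    else if t = [] then pvRunsP [] cs else t :: pvRunsP [] cs

-- "first longest, strict improvement" selection, A's tie-break
def pvPick (f : List Char) (rs : List (List Char)) : List Char :=
  rs.foldl (fun b r => if r.length > b.length then r else b) f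

-- B's argmax loop in recursive form, value at i read off as pvTW of the suffix
def pvArg : Nat → Nat × Nat → List Char → Nat × Nat
  | _, st, [] => st
  | k, st, c :: cs => pvArg (k + 1) (if pvTW (c :: cs) > st.1 then (pvTW (c :: cs), k) else st) cs

-- ---- A-side: the scan computes the first-longest selection over the runs ----

lemma pvScan_eq_pick (cs : List Char) : ∀ f t : List Char,
    pvAnswerA (cs.foldl pvStepA (f, f.length, t, t.length)) = pvPick f (pvRunsP t cs) := by
  induction cs with
  | nil =>
    intro f t
    by_cases ht : t = []
    · subst ht; simp [pvRunsP, pvPick, pvAnswerA]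
    · by_cases h : t.length > f.length <;>
        simp [pvRunsP, pvPick, pvAnswerA, ht, h]
  | cons c cs ih =>
    intro f t
    simp only [List.foldl_cons]
    by_cases hd : PySem.Chars.isdigit c
    · have := ih f (t ++ [c])
      simp only [pvRunsP, pvStepA, hd, if_true]
      simpa [List.length_append] using this
    · simp only [pvRunsP, pvStepA, hd, Bool.false_eq_true, if_false]
      by_cases ht : t = []
      · subst ht
        have hl : ¬ ((0:Nat) > f.length) := by omega
        simpa [hl] using ih f []
      · by_cases h : t.length > f.length
        · have := ih t []
          simp only [h, if_true, ht, if_false]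
          simpa [pvPick, h] using this
        · have := ih f []
          simp only [h, if_false, ht]
          simpa [pvPick, h] using this

-- ---- runs decomposition lemmas ----

lemma pvTW_append (d rest : List Char) (hd : ∀ c ∈ d, PySem.Chars.isdigit c)
    (hr : pvTW rest = 0) : pvTW (d ++ rest) = d.length := by
  induction d with
  | nil => simpa [pvTW] using hr
  | cons c d ih =>
    have hc : PySem.Chars.isdigit c := hd c (by simp)
    have : pvTW (d ++ rest) = d.length := ih (fun x hx => hd x (by simp [hx]))
    simp [pvTW, hc] at this ⊢
    omega

lemma pvRunsP_digits (d : List Char) : ∀ (cs t : List Char),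
    (∀ c ∈ d, PySem.Chars.isdigit c) → pvRunsP t (d ++ cs) = pvRunsP (t ++ d) cs := by
  induction d with
  | nil => intro cs t _; simp
  | cons c d ih =>
    intro cs t hd
    have hc : PySem.Chars.isdigit c := hd c (by simp)
    simp only [List.cons_append, pvRunsP, hc, if_true]
    rw [ih cs (t ++ [c]) (fun x hx => hd x (by simp [hx]))]
    simp

lemma pvRunsP_boundary (d rest : List Char) (hne : d ≠ []) (hr : pvTW rest = 0) :
    pvRunsP d rest = d :: pvRunsP [] rest := by
  cases rest with
  | nil => simp [pvRunsP, hne]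
  | cons c rest' =>
    have hc : ¬ PySem.Chars.isdigit c := by
      intro h; simp [pvTW, h] at hr
    simp [pvRunsP, hc, hne]

-- ---- B-side: the fold over enumerate is pvArg ----

lemma pvRunVals_headD (cs : List Char) : (pvRunVals cs).headD 0 = pvTW cs := by
  induction cs with
  | nil => simp [pvRunVals, pvTW]
  | cons c cs ih =>
    by_cases hd : PySem.Chars.isdigit c <;>
      simp [pvRunVals, pvTW, hd] at ih ⊢ <;> omega

-- the table entries 0..n-1, as pvTW of the successive suffixes
def pvVals : List Char → List Nat
  | [] => []
  | c :: cs => pvTW (c :: cs) :: pvVals cs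

lemma pvRunVals_take (cs : List Char) : (pvRunVals cs).take cs.length = pvVals cs := by
  induction cs with
  | nil => simp [pvRunVals, pvVals]
  | cons c cs ih =>
    simp only [pvRunVals, pvVals, List.length_cons, List.take_succ_cons]
    rw [ih, pvRunVals_headD]
    by_cases hd : PySem.Chars.isdigit c <;> simp [pvTW, hd]

lemma pvFold_eq_pvArg (cs : List Char) : ∀ (k : Nat) (st : Nat × Nat),
    (PySem.List.enumerate (pvVals cs) (k : Int)).foldl pvArgStep st = pvArg k st cs := by
  induction cs with
  | nil => intro k st; simp [pvVals, PySem.List.enumerate_nil, pvArg]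
  | cons c cs ih =>
    intro k st
    simp only [pvVals, PySem.List.enumerate_cons, List.foldl_cons, pvArg]
    have h1 : ((k : Int) + 1) = ((k + 1 : Nat) : Int) := by push_cast; ring
    rw [h1, ih]
    by_cases h : pvTW (c :: cs) > st.1 <;> simp [pvArgStep, h]

-- pvArg walks through one whole digit run in a single (possible) update
lemma pvArg_run (d : List Char) : ∀ (rest : List Char) (k : Nat) (st : Nat × Nat),
    d ≠ [] → (∀ c ∈ d, PySem.Chars.isdigit c) → pvTW rest = 0 →
    pvArg k st (d ++ rest) =
      pvArg (k + d.length) (if d.length > st.1 then (d.length, k) else st) rest := by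
  induction d with
  | nil => intro _ _ _ h; exact absurd rfl h
  | cons c d ih =>
    intro rest k st _ hd hr
    have hc : PySem.Chars.isdigit c := hd c (by simp)
    have htw : pvTW (c :: (d ++ rest)) = d.length + 1 := by
      have := pvTW_append (c :: d) rest hd hr
      simpa using this
    simp only [List.cons_append, pvArg, htw, List.length_cons]
    cases hde : d with
    | nil => simp
    | cons c' d'' =>
      rw [← hde]
      have hdne : d ≠ [] := by rw [hde]; exact List.cons_ne_nil _ _
      rw [ih rest (k + 1) _ hdne (fun x hx => hd x (by simp [hx])) hr]
      have hfalse : ¬ (d.length > (if d.length + 1 > st.1 then (d.length + 1, k) else st).1) := by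
        by_cases h : d.length + 1 > st.1
        · simp [h]
        · simp only [if_neg h]; omega
      rw [if_neg hfalse]
      have he : k + 1 + d.length = k + (d.length + 1) := by omega
      rw [he]

-- the heart: pvArg's final (best, start) slices out exactly the first-longest pick
lemma pvMain : ∀ (n : Nat) (cs : List Char), cs.length ≤ n →
    ∀ (cs0 : List Char) (k b s : Nat), cs0.drop k = cs →
    b = ((cs0.drop s).take b).length →
    (cs0.drop (pvArg k (b, s) cs).2).take (pvArg k (b, s) cs).1
      = pvPick ((cs0.drop s).take b) (pvRunsP [] cs)
    ∧ (pvArg k (b, s) cs).1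
      = ((cs0.drop (pvArg k (b, s) cs).2).take (pvArg k (b, s) cs).1).length := by
  intro n
  induction n with
  | zero =>
    intro cs hlen cs0 k b s hk hb
    have : cs = [] := List.length_eq_zero_iff.mp (Nat.le_zero.mp hlen)
    subst this
    exact ⟨by simpa [pvArg, pvRunsP, pvPick] using hb.symm, by simpa [pvArg] using hb⟩
  | succ n ih =>
    intro cs hlen cs0 k b s hk hb
    cases hcs : cs with
    | nil =>
      subst hcs
      exact ⟨by simpa [pvArg, pvRunsP, pvPick] using hb.symm, by simpa [pvArg] using hb⟩
    | cons c cs' =>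
      subst hcs
      by_cases hd : PySem.Chars.isdigit c
      · -- leading digit run
        set d := (c :: cs').takeWhile PySem.Chars.isdigit with hddef
        set rest := (c :: cs').dropWhile PySem.Chars.isdigit with hrdef
        have hsplit : d ++ rest = c :: cs' := List.takeWhile_append_dropWhile
        have hdne : d ≠ [] := by
          simp only [hddef, List.takeWhile_cons, hd, if_true]
          exact List.cons_ne_nil _ _
        have hall : ∀ x ∈ d, PySem.Chars.isdigit x := fun x hx =>
          List.mem_takeWhile_imp hx
        have hrtw : pvTW rest = 0 := by
          cases hre : rest with
          | nil => simp [pvTW]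
          | cons r rs =>
            have : ¬ PySem.Chars.isdigit r := by
              have := List.head?_dropWhile_not (p := PySem.Chars.isdigit) (l := c :: cs')
              rw [← hrdef, hre] at this
              simpa using this
            simp [pvTW, this]
        have hrlen : rest.length ≤ n := by
          have h1 : d.length + rest.length = cs'.length + 1 := by
            have := congrArg List.length hsplit; simpa using this
          have h2 : 0 < d.length := List.length_pos_iff.mpr hdne
          have h3 : cs'.length + 1 ≤ n + 1 := by simpa using hlen
          omega
        rw [← hsplit]
        rw [pvArg_run d rest k (b, s) hdne hall hrtw]
        rw [pvRunsP_digits d rest [] hall, List.nil_append,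
          pvRunsP_boundary d rest hdne hrtw]
        have hdk : cs0.drop k = d ++ rest := by rw [hk, ← hsplit]
        have hrest : cs0.drop (k + d.length) = rest := by
          rw [← List.drop_drop, hdk, List.drop_left]
        by_cases hbig : d.length > b
        · rw [if_pos (by simpa using hbig)]
          have hfd : (cs0.drop k).take d.length = d := by
            rw [hdk, List.take_left]
          have := ih rest hrlen cs0 (k + d.length) d.length k hrest
            (by rw [hfd])
          refine ⟨?_, this.2⟩
          rw [this.1, hfd]
          have : pvPick ((cs0.drop s).take b) (d :: pvRunsP [] rest)
              = pvPick d (pvRunsP [] rest) := by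
            simp only [pvPick, List.foldl_cons]
            rw [← hb] at *
            simp [hbig]
          rw [this]
        · rw [if_neg (by simpa using hbig)]
          have := ih rest hrlen cs0 (k + d.length) b s hrest hb
          refine ⟨?_, this.2⟩
          rw [this.1]
          have : pvPick ((cs0.drop s).take b) (d :: pvRunsP [] rest)
              = pvPick ((cs0.drop s).take b) (pvRunsP [] rest) := by
            simp only [pvPick, List.foldl_cons]
            rw [← hb]
            simp [hbig]
          rw [this]
      · -- nondigit head: value 0, never selected
        have htw : pvTW (c :: cs') = 0 := by simp [pvTW, hd]
        have hstep : pvArg k (b, s) (c :: cs') = pvArg (k + 1) (b, s) cs' := by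
          simp [pvArg, htw]
        have hrest : cs0.drop (k + 1) = cs' := by
          rw [← List.drop_drop, hk]; simp
        have hlen' : cs'.length ≤ n := by simpa using hlen
        have := ih cs' hlen' cs0 (k + 1) b s hrest hb
        rw [hstep]
        refine ⟨?_, this.2⟩
        rw [this.1]
        simp [pvRunsP, hd]

-- the two bodies agree on ANY first token s
lemma pvBody_eq (s : String) :
    (if PySem.Str.strIsdigit s then s
     else String.ofList (pvAnswerA (s.toList.foldl pvStepA ([], 0, [], 0))))
    = String.ofList
        (PySem.List.slice s.toList
          (some ((((PySem.List.enumerate ((pvRunVals s.toList).take s.toList.length) 0).foldl pvArgStep (0, 0)).2 : Nat) : Int))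
          (some (((((PySem.List.enumerate ((pvRunVals s.toList).take s.toList.length) 0).foldl pvArgStep (0, 0)).2 : Nat) : Int)
            + ((((PySem.List.enumerate ((pvRunVals s.toList).take s.toList.length) 0).foldl pvArgStep (0, 0)).1 : Nat) : Int)))) := by
  have hcast : ((0:Nat) : Int) = 0 := rfl
  rw [pvRunVals_take, ← hcast, pvFold_eq_pvArg]
  have hmain := pvMain s.toList.length s.toList (le_refl _) s.toList 0 0 0 rfl (by simp)
  rw [PySem.List.slice_natCast_add, hmain.1]
  by_cases hd : PySem.Str.strIsdigit s
  · -- all-digit, nonempty: the runs list is exactly [s.toList]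
    have hd' := hd
    rw [PySem.Str.strIsdigit_eq] at hd'
    simp only [PySem.Chars.strIsdigit, Bool.and_eq_true] at hd'
    obtain ⟨h1, h2⟩ := hd'
    have hne : s.toList ≠ [] := by
      intro h; rw [h] at h1; simp at h1
    have hall : ∀ c ∈ s.toList, PySem.Chars.isdigit c := by
      intro c hc; exact List.all_eq_true.mp h2 c hc
    have hruns : pvRunsP [] s.toList = [s.toList] := by
      have := pvRunsP_digits s.toList [] [] hall
      simp only [List.append_nil, List.nil_append] at this
      rw [this]
      simp [pvRunsP, hne]
    rw [if_pos hd, hruns]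
    have hpos : s.toList.length > 0 := List.length_pos_iff.mpr hne
    simp only [List.drop_zero, List.take_zero, pvPick, List.foldl_cons, List.foldl_nil,
      List.length_nil]
    rw [if_pos (by simpa using hpos)]
    rw [String.ofList_toList]
  · rw [if_neg hd]
    have h1 := pvScan_eq_pick s.toList [] []
    simp only [List.length_nil] at h1
    rw [h1]
    simp

-- ===== VERDICT (by name: the statement is the Claim_ definition above) =====
theorem Name_Checking_spec : Claim_equal_Name_Checking := by
  intro name _
  unfold Spec_Name_Checking Name_Checking Name_Checking_alt
  exact pvBody_eq _
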